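-- pv_equiv track=rewrite | github.com/abhinav-gera12/Data-Structure-Algorithm-DSA | DSA-questions/sandglass_pattern.py | generate_sandglass
-- ===== SOURCE A (Python) =====
-- def generate_sandglass(n):
--     """
--     Function to return a sandglass pattern of '*' of side n as a list of strings.
--
--     Parameters:
--     n (int): The height of the sandglass.
--
--     Returns:
--     list: A list of strings where each string represents a row of the sandglass pattern.
--     """
--     # Your code here
--     if n >=1 and n <=100:
--         sandglass = []
--         for i in range(n):
--             stars = "*" * (2 * (n-i) - 1)
--             spaces = " " * i
--             row = spaces + stars + spaces
--             sandglass.append(row)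
--
--         for i in range(n-2, -1, -1):
--             stars = "*" * (2 * (n-i) - 1)
--             spaces = " " * i
--             row = spaces + stars + spaces
--             sandglass.append(row)
--         return sandglass
-- ===== SOURCE B (Python) =====
-- def _sg(n):
--     """Sandglass of height n built recursively: full row, padded inner sandglass, full row."""
--     if n == 1:
--         return ["*"]
--     full = "*" * (2 * n - 1)
--     return [full] + [" " + row + " " for row in _sg(n - 1)] + [full]
--
--
-- def generate_sandglass(n):
--     if 1 <= n <= 100:
--         return _sg(n)
-- ===== Notes on version B (the rewrite author's own statement) =====
-- stated objective: alternative
-- what changed: B builds the sandglass recursively on its nested structure (sandglass(n) = full row + one-space-padded sandglass(n-1) + full row), instead of A's two index loops that compute each row from a star/space count formula.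
import Mathlib
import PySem

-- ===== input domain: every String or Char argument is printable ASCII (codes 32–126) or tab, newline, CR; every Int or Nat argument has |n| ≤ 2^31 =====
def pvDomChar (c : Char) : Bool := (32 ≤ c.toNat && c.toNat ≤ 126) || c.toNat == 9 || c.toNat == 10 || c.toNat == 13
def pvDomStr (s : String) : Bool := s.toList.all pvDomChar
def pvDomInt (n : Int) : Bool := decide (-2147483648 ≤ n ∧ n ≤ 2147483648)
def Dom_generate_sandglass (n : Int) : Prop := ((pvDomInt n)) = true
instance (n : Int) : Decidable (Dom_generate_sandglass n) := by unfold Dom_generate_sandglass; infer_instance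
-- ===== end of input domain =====

-- B replaces A's two row-formula loops by a recursion on the sandglass's nested structure
-- (full row + one-space-padded inner sandglass + full row); same cost, different algorithm.

-- ===== PORT A =====
-- A's row expression " "*i + "*"*(2*(n-i)-1) + " "*i;
-- str*k ported by hand as List.replicate k.toNat — exact, since Python gives "" for k ≤ 0
def pvRowA (n i : Int) : String :=
  String.ofList (List.replicate i.toNat ' ' ++ List.replicate (2 * (n - i) - 1).toNat '*'
             ++ List.replicate i.toNat ' ')

def generate_sandglass (n : Int) : Option (List String) :=
  if n ≥ 1 ∧ n ≤ 100 then
    let sandglass : List String :=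
      (PySem.List.pyRange 0 n 1).foldl (fun acc i => acc ++ [pvRowA n i]) []
    let sandglass :=
      (PySem.List.pyRange (n - 2) (-1) (-1)).foldl (fun acc i => acc ++ [pvRowA n i]) sandglass
    some sandglass
  else
    none

-- ===== PORT B =====
-- Source B's _sg, recursing on n-1 inside the guard 1 ≤ n (Lean measure: the Nat value of n).
-- "*" * (2*n-1) and " " + row + " " ported by hand over List Char — exact on this domain.
def pvSg : Nat → List String
  | 0 => []          -- unreachable: _sg is only called with n ≥ 1
  | 1 => ["*"]
  | (m+2) =>
    let full := String.ofList (List.replicate (2 * (m + 2) - 1) '*')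
    [full] ++ (pvSg (m+1)).map (fun row => String.ofList (' ' :: row.toList ++ [' '])) ++ [full]

def generate_sandglass_alt (n : Int) : Option (List String) :=
  if 1 ≤ n ∧ n ≤ 100 then some (pvSg n.toNat) else none

-- ===== PRECONDITION & SPEC =====
def Spec_generate_sandglass (n : Int) (out : Option (List String)) : Prop := out = generate_sandglass_alt n
instance (n : Int) (out : Option (List String)) : Decidable (Spec_generate_sandglass n out) := by unfold Spec_generate_sandglass; infer_instance

-- ===== CLAIM (what is proved, stated in full; the proofs are below) =====
def Claim_equal_generate_sandglass : Prop := ∀ (n : Int), Dom_generate_sandglass n → Spec_generate_sandglass n (generate_sandglass n)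

-- ===== LEMMAS AND PROOFS =====

-- Nat-indexed version of A's row
def pvRowN (m i : Nat) : String :=
  String.ofList (List.replicate i ' ' ++ List.replicate (2 * (m - i) - 1) '*'
             ++ List.replicate i ' ')

-- padding a row with one space on each side is A's row one level deeper
theorem pvPad_rowN (k i : Nat) :
    String.ofList (' ' :: (pvRowN k i).toList ++ [' ']) = pvRowN (k+1) (i+1) := by
  simp [pvRowN, List.replicate_succ]
  rw [← List.replicate_succ', List.replicate_succ]

-- characterisation of B's recursion as A-shaped row lists
theorem pvSg_eq (m : Nat) (hm : 1 ≤ m) :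
    pvSg m = (List.range m).map (pvRowN m)
           ++ ((List.range (m-1)).map (pvRowN m)).reverse := by
  induction m with
  | zero => omega
  | succ k ih =>
    match k, ih with
    | 0, _ => simp [pvSg, pvRowN]
    | (j+1), ih =>
      have h1 : 1 ≤ j + 1 := by omega
      rw [show j + 1 + 1 = j + 2 from rfl, pvSg, ih h1]
      simp only [List.map_append, List.map_map, List.map_reverse]
      have hrow0 : String.ofList (List.replicate (2 * (j + 2) - 1) '*') = pvRowN (j+2) 0 := by
        simp [pvRowN]
      have hpad : ((fun row => String.ofList (' ' :: row.toList ++ [' '])) ∘ pvRowN (j+1))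
          = fun i => pvRowN (j+2) (i+1) := by
        funext i; exact pvPad_rowN (j+1) i
      rw [hpad]
      have hr : (List.range (j+2)).map (pvRowN (j+2))
          = pvRowN (j+2) 0 :: (List.range (j+1)).map (fun i => pvRowN (j+2) (i+1)) := by
        rw [List.range_succ_eq_map]
        simp [List.map_map, Function.comp]
      have hr2 : (List.range (j+2-1)).map (pvRowN (j+2))
          = pvRowN (j+2) 0 :: (List.range j).map (fun i => pvRowN (j+2) (i+1)) := by
        rw [show j + 2 - 1 = j + 1 from rfl, List.range_succ_eq_map]
        simp [List.map_map, Function.comp]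
      rw [hr, hr2]
      simp [hrow0]

-- A's Int row equals the Nat row on in-range indices
theorem pvRowA_eq (n : Int) (k : Nat) (h0 : 1 ≤ n) (hk : (k : Int) < n) :
    pvRowA n (k : Int) = pvRowN n.toNat k := by
  have h1 : ((k : Int)).toNat = k := Int.toNat_natCast k
  have h2 : (2 * (n - (k : Int)) - 1).toNat = 2 * (n.toNat - k) - 1 := by omega
  simp [pvRowA, pvRowN, h1, h2]

-- ===== VERDICT (by name: the statement is the Claim_ definition above) =====
theorem generate_sandglass_spec : Claim_equal_generate_sandglass := by
  intro n _
  unfold Spec_generate_sandglass generate_sandglass generate_sandglass_alt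
  by_cases h : 1 ≤ n ∧ n ≤ 100
  · rw [if_pos ⟨h.1, h.2⟩, if_pos h]
    simp only [PySem.List.foldl_append_singleton_eq_map, List.nil_append,
      PySem.List.pyRange_neg_one_eq_reverse, List.map_reverse]
    have e1 : (-1 : Int) + 1 = 0 := by ring
    have e2 : n - 2 + 1 = n - 1 := by ring
    rw [e1, e2]
    have hrange : PySem.List.pyRange 0 n 1 = (List.range n.toNat).map (fun (k : Nat) => (k : Int)) := by
      have := PySem.List.pyRange_zero_natCast n.toNat
      rwa [Int.toNat_of_nonneg (by omega : (0:Int) ≤ n)] at this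
    have hrange1 : PySem.List.pyRange 0 (n-1) 1
        = (List.range (n.toNat - 1)).map (fun (k : Nat) => (k : Int)) := by
      have := PySem.List.pyRange_zero_natCast (n.toNat - 1)
      rwa [show ((n.toNat - 1 : Nat) : Int) = n - 1 by omega] at this
    have hA : (PySem.List.pyRange 0 n 1).map (pvRowA n)
        = (List.range n.toNat).map (pvRowN n.toNat) := by
      rw [hrange, List.map_map]
      refine List.map_congr_left (fun k hk => ?_)
      have : k < n.toNat := List.mem_range.mp hk
      exact pvRowA_eq n k h.1 (by omega)
    have hB : (PySem.List.pyRange 0 (n-1) 1).map (pvRowA n)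
        = (List.range (n.toNat - 1)).map (pvRowN n.toNat) := by
      rw [hrange1, List.map_map]
      refine List.map_congr_left (fun k hk => ?_)
      have : k < n.toNat - 1 := List.mem_range.mp hk
      exact pvRowA_eq n k h.1 (by omega)
    rw [hA, hB, ← pvSg_eq n.toNat (by omega)]
  · rw [if_neg (by exact fun hc => h ⟨hc.1, hc.2⟩), if_neg h]
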